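-- pv_equiv track=rewrite | github.com/Xike-yuhuofei/SiligenPlatform | scripts/validation/boundary_audit/module_boundary_audit.py | classify_findings
-- ===== SOURCE A (Python) =====
-- from typing import Any
--
-- def classify_findings(findings: list[dict[str, Any]], policy: dict[str, Any]) -> tuple[list[dict[str, Any]], list[dict[str, Any]], list[dict[str, Any]]]:
--     blocking_kinds = set(policy.get("blocking_findings", []))
--     advisory_kinds = set(policy.get("advisory_findings", []))
--     blocking: list[dict[str, Any]] = []
--     advisory: list[dict[str, Any]] = []
--     observations: list[dict[str, Any]] = []
--     for item in findings:
--         kind = item["kind"]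
--         if kind in blocking_kinds:
--             blocking.append(item)
--         elif kind in advisory_kinds:
--             advisory.append(item)
--         else:
--             observations.append(item)
--     return blocking, advisory, observations
-- ===== SOURCE B (Python) =====
-- def classify_findings(findings, policy):
--     blocking_kinds = set(policy.get("blocking_findings", []))
--     advisory_kinds = set(policy.get("advisory_findings", []))
--     blocking = [x for x in findings if x["kind"] in blocking_kinds]
--     advisory = [x for x in findings
--                 if x["kind"] not in blocking_kinds and x["kind"] in advisory_kinds]
--     observations = [x for x in findings
--                     if x["kind"] not in blocking_kinds and x["kind"] not in advisory_kinds]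
--     return blocking, advisory, observations
-- ===== Notes on version B (the rewrite author's own statement) =====
-- stated objective: alternative
-- what changed: A's single loop with three accumulators is replaced by three independent filtering passes (list comprehensions) over findings, one per output bucket, with the elif precedence expressed explicitly in each predicate.
import Mathlib
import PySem

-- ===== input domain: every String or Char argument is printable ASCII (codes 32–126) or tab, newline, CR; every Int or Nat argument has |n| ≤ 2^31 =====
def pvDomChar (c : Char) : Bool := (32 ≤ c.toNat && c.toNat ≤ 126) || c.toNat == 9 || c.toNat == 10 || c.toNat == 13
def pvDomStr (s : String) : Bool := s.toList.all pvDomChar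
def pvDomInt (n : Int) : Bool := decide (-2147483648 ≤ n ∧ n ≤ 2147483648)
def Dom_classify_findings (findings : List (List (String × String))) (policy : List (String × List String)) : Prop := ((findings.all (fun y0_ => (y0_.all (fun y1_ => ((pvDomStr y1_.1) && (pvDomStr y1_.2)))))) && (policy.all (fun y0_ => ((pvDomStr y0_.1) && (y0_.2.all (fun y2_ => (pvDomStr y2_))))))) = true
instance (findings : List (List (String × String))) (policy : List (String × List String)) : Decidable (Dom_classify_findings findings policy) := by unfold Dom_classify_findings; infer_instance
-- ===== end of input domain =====

-- B replaces A's single loop (three accumulators, elif chain) by three independent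
-- filter passes over findings, one per bucket (objective: alternative decomposition).

-- ===== PORT A =====
-- item["kind"] is total here via getD with "" — exact under Pre_ (every item has the key "kind")
def classify_findings (findings : List (List (String × String))) (policy : List (String × List String)) : (List (List (String × String))) × (List (List (String × String))) × (List (List (String × String))) :=
  let blocking_kinds : PySem.Set String := PySem.Set.ofList ((PySem.Dict.mk policy).getD "blocking_findings" [])
  let advisory_kinds : PySem.Set String := PySem.Set.ofList ((PySem.Dict.mk policy).getD "advisory_findings" [])
  let r := findings.foldl (fun (acc : (List (List (String × String))) × (List (List (String × String))) × (List (List (String × String)))) item =>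
    let kind := (PySem.Dict.mk item).getD "kind" ""
    if blocking_kinds.contains kind then (acc.1 ++ [item], acc.2.1, acc.2.2)
    else if advisory_kinds.contains kind then (acc.1, acc.2.1 ++ [item], acc.2.2)
    else (acc.1, acc.2.1, acc.2.2 ++ [item])) ([], [], [])
  r

-- ===== PORT B =====
def classify_findings_alt (findings : List (List (String × String))) (policy : List (String × List String)) : (List (List (String × String))) × (List (List (String × String))) × (List (List (String × String))) :=
  let blocking_kinds : PySem.Set String := PySem.Set.ofList ((PySem.Dict.mk policy).getD "blocking_findings" [])
  let advisory_kinds : PySem.Set String := PySem.Set.ofList ((PySem.Dict.mk policy).getD "advisory_findings" [])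
  let blocking := findings.filter (fun x => blocking_kinds.contains ((PySem.Dict.mk x).getD "kind" ""))
  let advisory := findings.filter (fun x => !blocking_kinds.contains ((PySem.Dict.mk x).getD "kind" "") && advisory_kinds.contains ((PySem.Dict.mk x).getD "kind" ""))
  let observations := findings.filter (fun x => !blocking_kinds.contains ((PySem.Dict.mk x).getD "kind" "") && !advisory_kinds.contains ((PySem.Dict.mk x).getD "kind" ""))
  (blocking, advisory, observations)

-- ===== PRECONDITION & SPEC =====
-- Pre_ excludes exactly the inputs where Python A raises KeyError: a finding without a "kind" key.
def Pre_classify_findings (findings : List (List (String × String))) (policy : List (String × List String)) : Prop :=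
  findings.all (fun item => (PySem.Dict.mk item).contains "kind") = true
instance (findings : List (List (String × String))) (policy : List (String × List String)) : Decidable (Pre_classify_findings findings policy) := by unfold Pre_classify_findings; infer_instance

def pvWitness_classify_findings : (List (List (String × String))) × (List (String × List String)) :=
  ([[("kind", "x")], [("kind", "y")], [("kind", "z")]],
   [("blocking_findings", ["x", "y"]), ("advisory_findings", ["y", "z"])])

def Spec_classify_findings (findings : List (List (String × String))) (policy : List (String × List String)) (out : (List (List (String × String))) × (List (List (String × String))) × (List (List (String × String)))) : Prop := out = classify_findings_alt findings policy
instance (findings : List (List (String × String))) (policy : List (String × List String)) (out : (List (List (String × String))) × (List (List (String × String))) × (List (List (String × String)))) : Decidable (Spec_classify_findings findings policy out) := by unfold Spec_classify_findings; infer_instance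

-- ===== CLAIM (what is proved, stated in full; the proofs are below) =====
def Claim_equal_classify_findings : Prop := ∀ (findings : List (List (String × String))) (policy : List (String × List String)), Dom_classify_findings findings policy → Pre_classify_findings findings policy → Spec_classify_findings findings policy (classify_findings findings policy)

-- ===== LEMMAS AND PROOFS =====

-- Invariant of A's loop: the fold with three accumulators computes the three filters, each appended.
theorem classify_fold_eq_filter
    (bk ak : PySem.Set String) (findings : List (List (String × String)))
    (b a o : List (List (String × String))) :
    findings.foldl (fun (acc : (List (List (String × String))) × (List (List (String × String))) × (List (List (String × String)))) item =>
      let kind := (PySem.Dict.mk item).getD "kind" ""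
      if bk.contains kind then (acc.1 ++ [item], acc.2.1, acc.2.2)
      else if ak.contains kind then (acc.1, acc.2.1 ++ [item], acc.2.2)
      else (acc.1, acc.2.1, acc.2.2 ++ [item])) (b, a, o)
    = (b ++ findings.filter (fun x => bk.contains ((PySem.Dict.mk x).getD "kind" "")),
       a ++ findings.filter (fun x => !bk.contains ((PySem.Dict.mk x).getD "kind" "") && ak.contains ((PySem.Dict.mk x).getD "kind" "")),
       o ++ findings.filter (fun x => !bk.contains ((PySem.Dict.mk x).getD "kind" "") && !ak.contains ((PySem.Dict.mk x).getD "kind" ""))) := by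
  induction findings generalizing b a o with
  | nil => simp
  | cons item rest ih =>
    simp only [List.foldl_cons, List.filter_cons]
    cases hb : bk.contains ((PySem.Dict.mk item).getD "kind" "") <;>
      cases ha : ak.contains ((PySem.Dict.mk item).getD "kind" "") <;>
        simp only [hb, ha, Bool.not_true, Bool.not_false, Bool.true_and, Bool.false_and,
          Bool.and_true, Bool.and_false, if_true, if_false, ih, List.append_assoc,
          List.cons_append, List.nil_append, List.singleton_append] <;> simp

-- ===== VERDICT (by name: the statement is the Claim_ definition above) =====
theorem classify_findings_spec : Claim_equal_classify_findings := by
  intro findings policy _ _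
  show classify_findings findings policy = classify_findings_alt findings policy
  unfold classify_findings classify_findings_alt
  simp only [classify_fold_eq_filter, List.nil_append]
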